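-- pv_equiv track=rewrite | github.com/aman-chauhan/nasa-breath-diagnostics-challenge | utils/parse_text.py | correct_time
-- ===== SOURCE A (Python) =====
-- def correct_time(data):
--     new_data = []
--     new_data.append(list(data[0]))
--     new_data[0][0] = f"00:{data[0][0]}"
--     hour_change = False
--     for i in range(1, len(data)):
--         prev_min = int(data[i - 1][0].split(":")[0])
--         curr_min = int(data[i][0].split(":")[0])
--         if curr_min < prev_min:
--             hour_change = True
--         new_data.append(list(data[i]))
--         if hour_change:
--             new_data[i][0] = f"01:{data[i][0]}"
--         else:
--             new_data[i][0] = f"00:{data[i][0]}"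
--     return new_data
-- ===== SOURCE B (Python) =====
-- def correct_time(data):
--     rollover = [int(c[0].split(":")[0]) < int(p[0].split(":")[0])
--                 for p, c in zip(data, data[1:])]
--     boundary = rollover.index(True) + 1 if True in rollover else len(data)
--     return [[("00:" if i < boundary else "01:") + row[0], *row[1:]]
--             for i, row in enumerate(data)]
-- ===== Notes on version B (the rewrite author's own statement) =====
-- stated objective: alternative
-- what changed: Replaced A's single stateful loop (appending rows while carrying an hour_change flag) with a two-pass decomposition: first compute the rollover list over adjacent pairs and take the first True's position as the boundary, then rebuild every row in one comprehension prefixing '00:' before the boundary and '01:' after.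
import Mathlib
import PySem

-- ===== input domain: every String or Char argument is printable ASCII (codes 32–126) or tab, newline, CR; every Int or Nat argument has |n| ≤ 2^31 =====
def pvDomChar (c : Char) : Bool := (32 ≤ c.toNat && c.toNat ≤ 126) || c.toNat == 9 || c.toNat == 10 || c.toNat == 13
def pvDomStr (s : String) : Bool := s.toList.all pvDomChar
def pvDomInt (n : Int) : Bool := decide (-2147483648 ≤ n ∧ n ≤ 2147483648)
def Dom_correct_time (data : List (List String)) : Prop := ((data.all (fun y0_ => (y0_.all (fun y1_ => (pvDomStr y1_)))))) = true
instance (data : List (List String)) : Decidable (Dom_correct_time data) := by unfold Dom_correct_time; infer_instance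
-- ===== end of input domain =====

-- B is a two-pass decomposition (find the rollover boundary, then prefix by index) instead of
-- A's single stateful loop; equal return value on Pre_; objective: alternative/simpler.

-- int(s.split(":")[0]), as an Option (none = ValueError)
def pvMin? (s : String) : Option Int :=
  (PySem.List.pyGet? ((PySem.Str.split? s ":").getD []) 0).bind PySem.Int.ofStr?

-- total version used inside the ports (exact wherever Python does not raise)
def pvMin (s : String) : Int := (pvMin? s).getD 0

-- first field of a row, row[0] (exact for nonempty rows; Pre_ excludes empty rows)
def pvHd (row : List String) : String := (PySem.List.pyGet? row 0).getD ""

-- ===== PORT A =====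
def correct_time (data : List (List String)) : List (List String) :=
  let first := (PySem.List.pyGet? data 0).getD []
  let new0 := first.set 0 ("00:" ++ pvHd first)
  let r := (PySem.List.pyRange 1 (data.length : Int) 1).foldl
    (fun (st : List (List String) × Bool) i =>
      let prev_min := pvMin (pvHd ((PySem.List.pyGet? data (i - 1)).getD []))
      let curr_min := pvMin (pvHd ((PySem.List.pyGet? data i).getD []))
      let hc := if curr_min < prev_min then true else st.2
      let row := (PySem.List.pyGet? data i).getD []
      let nd := st.1 ++ [row]
      (nd.set i.toNat (row.set 0 ((if hc then "01:" else "00:") ++ pvHd row)), hc))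
    ([new0], false)
  r.1

-- ===== PORT B =====
def correct_time_alt (data : List (List String)) : List (List String) :=
  let rollover := (data.zip (PySem.List.slice data (some 1) none)).map
    (fun pc => decide (pvMin (pvHd pc.2) < pvMin (pvHd pc.1)))
  let boundary : Int := match PySem.List.index? rollover true with
    | some j => (j : Int) + 1
    | none => (data.length : Int)
  (PySem.List.enumerate data 0).map
    (fun ir => ((if ir.1 < boundary then "00:" else "01:") ++ pvHd ir.2)
                 :: PySem.List.slice ir.2 (some 1) none)

-- ===== PRECONDITION & SPEC =====
-- Pre_ excludes exactly the inputs on which A raises: empty data (IndexError), an empty row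
-- (IndexError), and — when there are at least two rows — a first field whose part before ':'
-- is not an int (ValueError).
def Pre_correct_time (data : List (List String)) : Prop :=
  data ≠ [] ∧ (∀ row ∈ data, row ≠ []) ∧
    (2 ≤ data.length → ∀ row ∈ data, (pvMin? (pvHd row)).isSome)
instance (data : List (List String)) : Decidable (Pre_correct_time data) := by
  unfold Pre_correct_time; infer_instance

def pvWitness_correct_time : List (List String) :=
  [["13:05", "a"], ["58:20"], ["02:11", "b"]]

def Spec_correct_time (data : List (List String)) (out : List (List String)) : Prop := out = correct_time_alt data
instance (data : List (List String)) (out : List (List String)) : Decidable (Spec_correct_time data out) := by unfold Spec_correct_time; infer_instance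

-- ===== CLAIM (what is proved, stated in full; the proofs are below) =====
def Claim_equal_correct_time : Prop := ∀ (data : List (List String)), Dom_correct_time data → Pre_correct_time data → Spec_correct_time data (correct_time data)

-- ===== LEMMAS AND PROOFS =====

-- minute value of row i (0 outside)
def pvM (data : List (List String)) (i : Nat) : Int := pvMin (pvHd (data.getD i []))

-- did the hour roll over between rows j and j+1
def pvRoll (data : List (List String)) (j : Nat) : Bool :=
  decide (pvM data (j + 1) < pvM data j)

-- A's hour_change flag after processing index i
def pvHc (data : List (List String)) : Nat → Bool
  | 0 => false
  | k + 1 => pvRoll data k || pvHc data k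

-- the row A produces at index i
def pvOut (data : List (List String)) (i : Nat) : List String :=
  let row := data.getD i []
  row.set 0 ((if pvHc data i then "01:" else "00:") ++ pvHd row)

theorem pvHc_eq_any (data : List (List String)) (i : Nat) :
    pvHc data i = (List.range i).any (pvRoll data) := by
  induction i with
  | zero => simp [pvHc]
  | succ k ih => simp [pvHc, ih, List.range_succ, List.any_append, Bool.or_comm]

theorem pvFold_eq (data : List (List String)) (k : Nat) (hk1 : 1 ≤ k)
    (hk : k ≤ data.length) :
    ((PySem.List.pyRange 1 (k : Int) 1).foldl
      (fun (st : List (List String) × Bool) i =>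
        let prev_min := pvMin (pvHd ((PySem.List.pyGet? data (i - 1)).getD []))
        let curr_min := pvMin (pvHd ((PySem.List.pyGet? data i).getD []))
        let hc := if curr_min < prev_min then true else st.2
        let row := (PySem.List.pyGet? data i).getD []
        let nd := st.1 ++ [row]
        (nd.set i.toNat (row.set 0 ((if hc then "01:" else "00:") ++ pvHd row)), hc))
      ([pvOut data 0], false)) = ((List.range k).map (pvOut data), pvHc data (k - 1)) := by
  induction k, hk1 using Nat.le_induction with
  | base =>
    rw [show ((1 : Nat) : Int) = 1 by norm_num, PySem.List.pyRange_one_eq_nil (by omega)]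
    simp [pvHc]
  | succ k hk1 ih =>
    have hkl : k ≤ data.length := by omega
    have hcast : (((k + 1 : Nat)) : Int) = (k : Int) + 1 := by push_cast; ring
    rw [hcast, PySem.List.pyRange_one_succ_right (by exact_mod_cast hk1), List.foldl_append,
      ih hkl]
    have h1 : ((k : Int) - 1) = ((k - 1 : Nat) : Int) := by omega
    have hgetk : (PySem.List.pyGet? data (k : Int)).getD [] = data.getD k [] := by
      simp [PySem.List.pyGet?_natCast, List.getD_eq_getElem?_getD]
    have hgetk1 : (PySem.List.pyGet? data ((k : Int) - 1)).getD [] = data.getD (k - 1) [] := by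
      rw [h1]; simp [PySem.List.pyGet?_natCast, List.getD_eq_getElem?_getD]
    simp only [List.foldl_cons, List.foldl_nil, hgetk, hgetk1]
    have hhc : (if pvMin (pvHd (data.getD k [])) < pvMin (pvHd (data.getD (k - 1) [])) then true
        else pvHc data (k - 1)) = pvHc data k := by
      have : k = (k - 1) + 1 := by omega
      rw [this, pvHc]
      have : k - 1 + 1 = k := by omega
      rw [this, pvRoll]
      have : (k - 1) + 1 = k := by omega
      rw [this, pvM, pvM]
      by_cases h : pvMin (pvHd (data.getD k [])) < pvMin (pvHd (data.getD (k - 1) []))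
      all_goals simp only [List.getD_eq_getElem?_getD] at h
      · rw [if_pos (by simpa [List.getD_eq_getElem?_getD] using h)]; simp [h]
      · rw [if_neg (by simpa [List.getD_eq_getElem?_getD] using h)]; simp [h]
    rw [hhc]
    have hlen : ((List.range k).map (pvOut data)).length = k := by simp
    have hset : ∀ (xs : List (List String)) (a b : List String), xs.length = k →
        (xs ++ [a]).set (k : Int).toNat b = xs ++ [b] := by
      intro xs a b hxs
      rw [Int.toNat_natCast, List.set_append, if_neg (by omega), hxs]
      simp
    rw [hset _ _ _ hlen, Prod.mk.injEq]
    refine ⟨?_, by simp⟩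
    rw [List.range_succ, List.map_append]
    simp [pvOut]

theorem correct_time_eq (data : List (List String)) (h : data ≠ []) :
    correct_time data = (List.range data.length).map (pvOut data) := by
  have hn : 1 ≤ data.length := by
    cases data with
    | nil => exact absurd rfl h
    | cons a l => simp
  have hfirst : ((PySem.List.pyGet? data 0).getD []).set 0
      ("00:" ++ pvHd ((PySem.List.pyGet? data 0).getD [])) = pvOut data 0 := by
    have : (PySem.List.pyGet? data 0).getD [] = data.getD 0 [] := by
      simp [PySem.List.pyGet?_zero, List.getD_eq_getElem?_getD]
    rw [this, pvOut]
    simp [pvHc]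
  unfold correct_time
  simp only [hfirst]
  rw [pvFold_eq data data.length hn le_rfl]

-- the rollover list B builds is pvRoll over indices 0..n-2
theorem pvRollover_eq (data : List (List String)) :
    (data.zip data.tail).map
        (fun pc => decide (pvMin (pvHd pc.2) < pvMin (pvHd pc.1)))
      = (List.range (data.length - 1)).map (pvRoll data) := by
  apply List.ext_getElem
  · simp [List.length_zip]
  · intro j h1 h2
    have hj : j + 1 < data.length := by
      simp [List.length_zip] at h1; omega
    simp only [List.getElem_map, List.getElem_zip, List.getElem_range, List.getElem_tail]
    rw [pvRoll, pvM, pvM, List.getD_eq_getElem data [] hj,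
      List.getD_eq_getElem data [] (by omega)]

-- B's index test against the boundary equals A's hour_change flag
theorem pvBoundary (data : List (List String)) (i : Nat) (hi : i < data.length) :
    (if (i : Int) < (match PySem.List.index?
          ((List.range (data.length - 1)).map (pvRoll data)) true with
        | some j => (j : Int) + 1
        | none => (data.length : Int)) then "00:" else "01:")
      = (if pvHc data i then "01:" else "00:") := by
  rw [pvHc_eq_any]
  rcases hidx : PySem.List.index?
      ((List.range (data.length - 1)).map (pvRoll data)) true with _ | j
  · have hmem : true ∉ (List.range (data.length - 1)).map (pvRoll data) :=
      (PySem.List.index?_eq_none_iff _ _).mp hidx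
    have hall : ∀ k, k < data.length - 1 → pvRoll data k = false := by
      intro k hk
      by_contra hcon
      exact hmem (List.mem_map.mpr ⟨k, List.mem_range.mpr hk, by
        cases h : pvRoll data k with
        | false => exact absurd h hcon
        | true => rfl⟩)
    have hany : (List.range i).any (pvRoll data) = false := by
      rw [List.any_eq_false]
      intro x hx
      simp [hall x (by have := List.mem_range.mp hx; omega)]
    rw [hany, if_pos (show (i : Int) < (data.length : Int) by exact_mod_cast hi)]
    simp
  · obtain ⟨hj, hval, hbefore⟩ := PySem.List.getElem_of_index?_eq_some hidx
    have hjlen : j < data.length - 1 := by simpa using hj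
    have hrj : pvRoll data j = true := by simpa using hval
    have hrk : ∀ k, k < j → pvRoll data k = false := by
      intro k hk
      have h2 := hbefore k hk
      rw [List.getElem_map, List.getElem_range] at h2
      cases h : pvRoll data k with
      | false => rfl
      | true => exact absurd h h2
    by_cases hij : i ≤ j
    · have hany : (List.range i).any (pvRoll data) = false := by
        rw [List.any_eq_false]
        intro x hx
        simp [hrk x (by have := List.mem_range.mp hx; omega)]
      rw [hany, if_pos (show (i : Int) < (j : Int) + 1 by exact_mod_cast Nat.lt_succ_of_le hij)]
      simp
    · have hany : (List.range i).any (pvRoll data) = true :=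
        List.any_eq_true.mpr ⟨j, List.mem_range.mpr (by omega), hrj⟩
      rw [hany, if_neg (show ¬ ((i : Int) < (j : Int) + 1) by exact_mod_cast fun hlt => hij (Nat.lt_succ_iff.mp hlt))]
      simp

theorem correct_time_alt_eq (data : List (List String))
    (hrow : ∀ row ∈ data, row ≠ []) :
    correct_time_alt data = (List.range data.length).map (pvOut data) := by
  unfold correct_time_alt
  rw [PySem.List.slice_from_one, pvRollover_eq]
  apply List.ext_getElem
  · simp
  · intro i h1 h2
    have hi : i < data.length := by simpa using h1
    simp only [List.getElem_map, PySem.List.getElem_enumerate, List.getElem_range, zero_add]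
    rw [PySem.List.slice_from_one]
    have hne : data[i] ≠ [] := hrow data[i] (List.getElem_mem hi)
    obtain ⟨a, t, hat⟩ := List.exists_cons_of_ne_nil hne
    rw [pvBoundary data i hi, pvOut, List.getD_eq_getElem data [] hi, hat]
    simp [pvHd]

-- ===== VERDICT (by name: the statement is the Claim_ definition above) =====
theorem correct_time_spec : Claim_equal_correct_time := by
  intro data _ hpre
  unfold Spec_correct_time
  rw [correct_time_eq data hpre.1, correct_time_alt_eq data hpre.2.1]
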